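-- pv_equiv track=rewrite | github.com/UnstableBlob/BugAuction | bugs/reusing_loop_variable/mainn.py | key_expand
-- ===== SOURCE A (Python) =====
-- def key_expand(seed, num_rounds):
--     keys = []
--     v = seed
--     for r in range(num_rounds):
--         round_key = []
--         for i in range(4):
--             v = (v * 0x6C62272E07BB0142 + r * 0xFF + i) & 0xFFFFFFFFFFFFFFFF
--             v ^= v >> 27
--             round_key.append(v)
--         keys.append(round_key)
--     return keys
-- ===== SOURCE B (Python) =====
-- def key_expand(seed, num_rounds):
--     def step(v, r, i):
--         v = (v * 0x6C62272E07BB0142 + r * 0xFF + i) & 0xFFFFFFFFFFFFFFFF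
--         return v ^ (v >> 27)
--
--     def expand(v, lo, hi):
--         # keys for rounds [lo, hi) starting from state v, plus the final state
--         if lo >= hi:
--             return [], v
--         if hi - lo == 1:
--             a = step(v, lo, 0)
--             b = step(a, lo, 1)
--             c = step(b, lo, 2)
--             d = step(c, lo, 3)
--             return [[a, b, c, d]], d
--         mid = (lo + hi) // 2
--         left, v1 = expand(v, lo, mid)
--         right, v2 = expand(v1, mid, hi)
--         return left + right, v2
--
--     return expand(seed, 0, num_rounds)[0]
-- ===== Notes on version B (the rewrite author's own statement) =====
-- stated objective: alternative
-- what changed: Replaces the iterative nested round/word loops with a divide-and-conquer recursion over the round interval: the interval [0,num_rounds) is split at its midpoint, each half is expanded recursively with the PRNG state threaded from the left half into the right, and the two key lists are concatenated; a single round is produced by an unrolled four-step body.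
import Mathlib
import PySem

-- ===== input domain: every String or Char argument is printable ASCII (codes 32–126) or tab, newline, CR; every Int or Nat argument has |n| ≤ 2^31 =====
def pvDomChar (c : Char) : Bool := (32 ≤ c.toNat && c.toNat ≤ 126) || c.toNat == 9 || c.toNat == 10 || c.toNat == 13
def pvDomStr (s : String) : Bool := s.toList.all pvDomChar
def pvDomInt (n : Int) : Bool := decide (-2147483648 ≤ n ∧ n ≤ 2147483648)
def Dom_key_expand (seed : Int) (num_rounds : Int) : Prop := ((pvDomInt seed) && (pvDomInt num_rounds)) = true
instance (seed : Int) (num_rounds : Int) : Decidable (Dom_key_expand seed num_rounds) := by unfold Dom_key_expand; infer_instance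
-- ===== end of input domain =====

-- B replaces the iterative nested round/word loops with a divide-and-conquer recursion over
-- the round interval, threading the PRNG state from the left half into the right half;
-- same results, a different decomposition (objective: alternative).

-- ===== PORT A =====
def key_expand (seed : Int) (num_rounds : Int) : List (List Int) :=
  let res := (PySem.List.pyRange 0 num_rounds 1).foldl
    (fun (st : List (List Int) × Int) r =>
      let inner := (PySem.List.pyRange 0 4 1).foldl
        (fun (st2 : List Int × Int) i =>
          let v1 := PySem.Int.band (st2.2 * 7809847782465536322 + r * 255 + i) 18446744073709551615
          let v2 := PySem.Int.bxor v1 (v1 >>> 27)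
          (st2.1 ++ [v2], v2))
        ([], st.2)
      (st.1 ++ [inner.1], inner.2))
    ([], seed)
  res.1

-- ===== PORT B =====
/-- Source B's `step`: one key-schedule update. -/
def pvStep (v r i : Int) : Int :=
  let w := PySem.Int.band (v * 7809847782465536322 + r * 255 + i) 18446744073709551615
  PySem.Int.bxor w (w >>> 27)

/-- Source B's `expand`: keys for rounds [lo, hi) from state v, plus the final state. -/
def pvExpand (v lo hi : Int) : List (List Int) × Int :=
  if _h1 : lo ≥ hi then ([], v)
  else if _h2 : hi - lo = 1 then
    let a := pvStep v lo 0
    let b := pvStep a lo 1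
    let c := pvStep b lo 2
    let d := pvStep c lo 3
    ([[a, b, c, d]], d)
  else
    let mid := PySem.Int.floordiv (lo + hi) 2
    let left := pvExpand v lo mid
    let right := pvExpand left.2 mid hi
    (left.1 ++ right.1, right.2)
termination_by (hi - lo).toNat
decreasing_by
  all_goals
    rw [PySem.Int.floordiv_eq_ediv_of_pos (by omega : (0:Int) < 2)]
    omega

def key_expand_alt (seed : Int) (num_rounds : Int) : List (List Int) :=
  (pvExpand seed 0 num_rounds).1

-- ===== PRECONDITION & SPEC =====
def Spec_key_expand (seed : Int) (num_rounds : Int) (out : List (List Int)) : Prop := out = key_expand_alt seed num_rounds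
instance (seed : Int) (num_rounds : Int) (out : List (List Int)) : Decidable (Spec_key_expand seed num_rounds out) := by unfold Spec_key_expand; infer_instance

-- ===== CLAIM (what is proved, stated in full; the proofs are below) =====
def Claim_equal_key_expand : Prop := ∀ (seed : Int) (num_rounds : Int), Dom_key_expand seed num_rounds → Spec_key_expand seed num_rounds (key_expand seed num_rounds)

-- ===== LEMMAS AND PROOFS =====

/-- Reference recursion: rounds produced starting from state `v` at round index `r`,
    together with the final state. -/
def pvSpec (v : Int) (r : Int) : Nat → List (List Int) × Int
  | 0 => ([], v)
  | R+1 =>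
    let a := pvStep v r 0
    let b := pvStep a r 1
    let c := pvStep b r 2
    let d := pvStep c r 3
    let rest := pvSpec d (r+1) R
    ([a,b,c,d] :: rest.1, rest.2)

theorem pvRange_four (a : Int) :
    PySem.List.pyRange a (a + 4) 1 = [a, a+1, a+2, a+3] := by
  rw [PySem.List.pyRange_one_cons (by omega), PySem.List.pyRange_one_cons (by omega),
      PySem.List.pyRange_one_cons (by omega), PySem.List.pyRange_one_cons (by omega),
      PySem.List.pyRange_one_eq_nil (by omega)]
  norm_num
  omega

/-- A's outer fold computes `pvSpec`. -/
theorem foldA (R : Nat) : ∀ (r : Int) (st : List (List Int) × Int),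
    (PySem.List.pyRange r (r + R) 1).foldl
      (fun (st : List (List Int) × Int) r =>
        let inner := (PySem.List.pyRange 0 4 1).foldl
          (fun (st2 : List Int × Int) i =>
            let v1 := PySem.Int.band (st2.2 * 7809847782465536322 + r * 255 + i) 18446744073709551615
            let v2 := PySem.Int.bxor v1 (v1 >>> 27)
            (st2.1 ++ [v2], v2))
          ([], st.2)
        (st.1 ++ [inner.1], inner.2))
      st
    = (st.1 ++ (pvSpec st.2 r R).1, (pvSpec st.2 r R).2) := by
  induction R with
  | zero =>
    intro r st
    rw [show r + (0:Nat) = r by simp, PySem.List.pyRange_one_eq_nil (le_refl r)]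
    simp [pvSpec]
  | succ R ih =>
    intro r st
    rw [show r + ((R+1 : Nat) : Int) = r + 1 + R by push_cast; ring,
        PySem.List.pyRange_one_cons (by omega : r < r + 1 + R)]
    rw [List.foldl_cons, ih (r+1)]
    have h4 : PySem.List.pyRange 0 4 1 = [0, 1, 2, 3] := by
      have := pvRange_four 0; norm_num at this; exact this
    simp only [h4]
    simp [pvSpec, pvStep]

theorem key_expand_eq (seed n : Int) :
    key_expand seed n = (pvSpec seed 0 n.toNat).1 := by
  unfold key_expand
  by_cases h : n ≤ 0
  · rw [PySem.List.pyRange_one_eq_nil h]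
    simp [show n.toNat = 0 by omega, pvSpec]
  · push Not at h
    have : (0 : Int) + (n.toNat : Int) = n := by omega
    rw [show PySem.List.pyRange 0 n 1 = PySem.List.pyRange 0 (0 + (n.toNat : Int)) 1 by rw [this]]
    rw [foldA]
    simp

/-- Splitting the reference recursion: rounds m+k decompose into the first m rounds
    followed by the next k rounds started from the intermediate state. -/
theorem pvSpec_append (m : Nat) : ∀ (k : Nat) (v r : Int),
    pvSpec v r (m + k)
      = ((pvSpec v r m).1 ++ (pvSpec (pvSpec v r m).2 (r + (m : Int)) k).1,
         (pvSpec (pvSpec v r m).2 (r + (m : Int)) k).2) := by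
  induction m with
  | zero =>
    intro k v r
    simp [pvSpec]
  | succ m ih =>
    intro k v r
    have hshift : (r + ((m + 1 : Nat) : Int)) = (r + 1) + (m : Int) := by push_cast; ring
    simp only [show m + 1 + k = (m + k) + 1 from by omega, pvSpec, ih k _ (r + 1), hshift]
    simp

/-- Source B's divide-and-conquer `expand` computes the reference recursion. -/
theorem pvExpand_eq (N : Nat) : ∀ (v lo hi : Int), (hi - lo).toNat = N →
    pvExpand v lo hi = pvSpec v lo N := by
  induction N using Nat.strong_induction_on with
  | _ N ih =>
    intro v lo hi hN
    rw [pvExpand]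
    split_ifs with h1 h2
    · have : N = 0 := by omega
      subst this; simp [pvSpec]
    · have : N = 1 := by omega
      subst this; simp [pvSpec]
    · have hmid : PySem.Int.floordiv (lo + hi) 2 = (lo + hi) / 2 :=
        PySem.Int.floordiv_eq_ediv_of_pos (by omega)
      set mid := PySem.Int.floordiv (lo + hi) 2 with hmiddef
      have hb : lo + 1 ≤ mid ∧ mid ≤ hi - 1 := by omega
      have hL := ih (mid - lo).toNat (by omega) v lo mid rfl
      have hR := ih (hi - mid).toNat (by omega) (pvExpand v lo mid).2 mid hi rfl
      rw [hL] at hR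
      dsimp only
      rw [hL, hR]
      have hsum : (mid - lo).toNat + (hi - mid).toNat = N := by omega
      have hmid2 : lo + ((mid - lo).toNat : Int) = mid := by omega
      rw [← hsum, pvSpec_append, hmid2]

theorem key_expand_alt_eq (seed n : Int) :
    key_expand_alt seed n = (pvSpec seed 0 n.toNat).1 := by
  unfold key_expand_alt
  rw [pvExpand_eq (n - 0).toNat seed 0 n rfl]
  norm_num

-- ===== VERDICT (by name: the statement is the Claim_ definition above) =====
theorem key_expand_spec : Claim_equal_key_expand := by
  intro seed n _
  unfold Spec_key_expand
  rw [key_expand_eq, key_expand_alt_eq]
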